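-- pv_equiv track=rewrite | github.com/hyunjinkim-developer/ProblemSolving | TestDome/Boat_Movements.py | can_travel_to
-- ===== SOURCE A (Python) =====
-- def can_travel_to(game_matrix, from_row, from_column, to_row, to_column):
--     answer = False
--
--     # left, right, up, down
--     dirs = [(0, -1), (0, 1), (-2, 0), (2, 0)]
--
--     def in_range(r, c):
--         return 0 <= r < len(game_matrix) and 0 <= c < len(game_matrix[0])
--
--     r, c = from_row, from_column
--     for dr, dc in dirs:
--         nr, nc = r + dr, c + dc
--         if not in_range(nr, nc): continue
--         if game_matrix[nr][nc] == False: continue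
--         if dc == 0 and game_matrix[r + (dr // 2)][nc] == False: continue
--
--         if nr == to_row and nc == to_column:
--             answer = True
--             break
--     return answer
-- ===== SOURCE B (Python) =====
-- def can_travel_to(game_matrix, from_row, from_column, to_row, to_column):
--     # Direct displacement test instead of looping over direction vectors.
--     dr = to_row - from_row
--     dc = to_column - from_column
--     if (dr, dc) not in ((0, -1), (0, 1), (-2, 0), (2, 0)):
--         return False
--     if not (0 <= to_row < len(game_matrix) and 0 <= to_column < len(game_matrix[0])):
--         return False
--     if game_matrix[to_row][to_column] == False:
--         return False
--     if dc == 0 and game_matrix[from_row + dr // 2][to_column] == False: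
--         return False
--     return True
-- ===== Notes on version B (the rewrite author's own statement) =====
-- stated objective: simpler
-- what changed: B computes the single displacement (to_row-from_row, to_column-from_column) and tests it against the four legal moves, replacing A's loop over the four direction vectors with its per-direction indexing and break logic.
import Mathlib
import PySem

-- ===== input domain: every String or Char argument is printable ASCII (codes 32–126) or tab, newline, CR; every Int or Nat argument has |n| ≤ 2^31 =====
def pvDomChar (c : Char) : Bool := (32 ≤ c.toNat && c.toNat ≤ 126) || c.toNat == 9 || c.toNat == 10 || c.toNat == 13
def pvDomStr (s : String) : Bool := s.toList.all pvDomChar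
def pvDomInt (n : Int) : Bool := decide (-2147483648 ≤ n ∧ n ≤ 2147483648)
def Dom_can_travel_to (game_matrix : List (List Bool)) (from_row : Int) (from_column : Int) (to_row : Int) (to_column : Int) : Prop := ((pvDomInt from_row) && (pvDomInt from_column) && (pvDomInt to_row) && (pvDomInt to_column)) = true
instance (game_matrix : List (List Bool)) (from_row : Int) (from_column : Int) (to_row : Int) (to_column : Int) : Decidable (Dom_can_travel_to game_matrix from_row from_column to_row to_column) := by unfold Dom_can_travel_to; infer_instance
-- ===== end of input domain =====

-- B replaces A's loop over the four direction vectors by a direct test of the one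
-- displacement (to - from) against the four legal moves (objective: simpler).

-- game_matrix[i][j] with Python index semantics; `none` exactly where Python raises
-- IndexError (those inputs are excluded by Pre_; the .getD false used in the ports
-- is only reached outside Pre_).
def pvCell (gm : List (List Bool)) (i j : Int) : Option Bool :=
  (PySem.List.pyGet? gm i).bind fun row => PySem.List.pyGet? row j

-- Python's `0 <= r < len(game_matrix) and 0 <= c < len(game_matrix[0])`
-- (len(game_matrix[0]) is only evaluated when the first conjunct holds, hence gm ≠ []).
def pvInRange (gm : List (List Bool)) (r c : Int) : Bool :=
  decide (0 ≤ r) && decide (r < (gm.length : Int)) &&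
  decide (0 ≤ c) && decide (c < ((gm.headD []).length : Int))

-- ===== PORT A =====
-- the for-loop over dirs with its continues and break, as structural recursion
def can_travel_to_go (gm : List (List Bool)) (r c to_r to_c : Int) :
    List (Int × Int) → Bool
  | [] => false
  | (dr, dc) :: rest =>
    let nr := r + dr
    let nc := c + dc
    if !pvInRange gm nr nc then can_travel_to_go gm r c to_r to_c rest
    else if (pvCell gm nr nc).getD false = false then can_travel_to_go gm r c to_r to_c rest
    else if dc = 0 ∧ (pvCell gm (r + PySem.Int.floordiv dr 2) nc).getD false = false then
      can_travel_to_go gm r c to_r to_c rest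
    else if nr = to_r ∧ nc = to_c then true
    else can_travel_to_go gm r c to_r to_c rest

def can_travel_to (game_matrix : List (List Bool)) (from_row : Int) (from_column : Int) (to_row : Int) (to_column : Int) : Bool :=
  can_travel_to_go game_matrix from_row from_column to_row to_column
    [(0, -1), (0, 1), (-2, 0), (2, 0)]

-- ===== PORT B =====
def can_travel_to_alt (game_matrix : List (List Bool)) (from_row : Int) (from_column : Int) (to_row : Int) (to_column : Int) : Bool :=
  let dr := to_row - from_row
  let dc := to_column - from_column
  if ¬ ((dr, dc) = ((0 : Int), (-1 : Int)) ∨ (dr, dc) = (0, 1) ∨ (dr, dc) = (-2, 0) ∨ (dr, dc) = (2, 0)) then false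
  else if !pvInRange game_matrix to_row to_column then false
  else if (pvCell game_matrix to_row to_column).getD false = false then false
  else if dc = 0 ∧ (pvCell game_matrix (from_row + PySem.Int.floordiv dr 2) to_column).getD false = false then false
  else true

-- ===== PRECONDITION & SPEC =====
-- Pre_ excludes exactly the inputs on which the Python A raises IndexError: some
-- direction passes the in-range check but the access to the target row, or (for a
-- vertical move whose target cell is True) to the midpoint row, is out of bounds.
def Pre_dir (gm : List (List Bool)) (fr fc dr dc : Int) : Prop :=
  pvInRange gm (fr + dr) (fc + dc) = true →
    (pvCell gm (fr + dr) (fc + dc) ≠ none ∧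
     ((dc = 0 ∧ pvCell gm (fr + dr) (fc + dc) = some true) →
       pvCell gm (fr + PySem.Int.floordiv dr 2) (fc + dc) ≠ none))

def Pre_can_travel_to (game_matrix : List (List Bool)) (from_row : Int) (from_column : Int) (to_row : Int) (to_column : Int) : Prop :=
  Pre_dir game_matrix from_row from_column 0 (-1) ∧
  Pre_dir game_matrix from_row from_column 0 1 ∧
  Pre_dir game_matrix from_row from_column (-2) 0 ∧
  Pre_dir game_matrix from_row from_column 2 0

instance (game_matrix : List (List Bool)) (from_row : Int) (from_column : Int) (to_row : Int) (to_column : Int) : Decidable (Pre_can_travel_to game_matrix from_row from_column to_row to_column) := by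
  unfold Pre_can_travel_to Pre_dir; infer_instance

def pvWitness_can_travel_to : List (List Bool) × Int × Int × Int × Int :=
  ([[true, true], [true, true]], 0, 0, 0, 1)

def Spec_can_travel_to (game_matrix : List (List Bool)) (from_row : Int) (from_column : Int) (to_row : Int) (to_column : Int) (out : Bool) : Prop := out = can_travel_to_alt game_matrix from_row from_column to_row to_column
instance (game_matrix : List (List Bool)) (from_row : Int) (from_column : Int) (to_row : Int) (to_column : Int) (out : Bool) : Decidable (Spec_can_travel_to game_matrix from_row from_column to_row to_column out) := by unfold Spec_can_travel_to; infer_instance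

-- ===== CLAIM (what is proved, stated in full; the proofs are below) =====
def Claim_equal_can_travel_to : Prop := ∀ (game_matrix : List (List Bool)) (from_row : Int) (from_column : Int) (to_row : Int) (to_column : Int), Dom_can_travel_to game_matrix from_row from_column to_row to_column → Pre_can_travel_to game_matrix from_row from_column to_row to_column → Spec_can_travel_to game_matrix from_row from_column to_row to_column (can_travel_to game_matrix from_row from_column to_row to_column)

-- ===== LEMMAS AND PROOFS =====
-- one direction's contribution: all the continue-branches collapse into `|| go rest`
def pvHit (gm : List (List Bool)) (r c tr tc dr dc : Int) : Bool :=
  pvInRange gm (r + dr) (c + dc) &&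
  (pvCell gm (r + dr) (c + dc)).getD false &&
  !(decide (dc = 0) && !((pvCell gm (r + PySem.Int.floordiv dr 2) (c + dc)).getD false)) &&
  (decide (r + dr = tr) && decide (c + dc = tc))

theorem go_cons (gm : List (List Bool)) (r c tr tc dr dc : Int) (rest : List (Int × Int)) :
    can_travel_to_go gm r c tr tc ((dr, dc) :: rest) =
      (pvHit gm r c tr tc dr dc || can_travel_to_go gm r c tr tc rest) := by
  simp only [can_travel_to_go, pvHit]
  split_ifs with hIn hCell hMid hTgt <;> simp_all
  · obtain ⟨h0, hm⟩ := hMid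
    subst h0
    simp_all
  · tauto

set_option maxHeartbeats 1000000 in
theorem can_travel_to_eq (gm : List (List Bool)) (fr fc tr tc : Int) :
    can_travel_to gm fr fc tr tc = can_travel_to_alt gm fr fc tr tc := by
  unfold can_travel_to can_travel_to_alt
  rw [go_cons, go_cons, go_cons, go_cons]
  simp only [can_travel_to_go, Bool.or_false, Prod.mk.injEq]
  by_cases h1 : tr = fr ∧ tc = fc - 1
  · obtain ⟨h1a, h1b⟩ := h1
    subst h1a; subst h1b
    simp only [pvHit]
    ring_nf
    split_ifs <;> simp_all
  by_cases h2 : tr = fr ∧ tc = fc + 1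
  · obtain ⟨h2a, h2b⟩ := h2
    subst h2a; subst h2b
    simp only [pvHit]
    ring_nf
    split_ifs <;> simp_all
  by_cases h3 : tr = fr - 2 ∧ tc = fc
  · obtain ⟨h3a, h3b⟩ := h3
    subst h3a; subst h3b
    simp only [pvHit]
    ring_nf
    split_ifs <;> simp_all
  by_cases h4 : tr = fr + 2 ∧ tc = fc
  · obtain ⟨h4a, h4b⟩ := h4
    subst h4a; subst h4b
    simp only [pvHit]
    ring_nf
    split_ifs <;> simp_all
  · have e1 : pvHit gm fr fc tr tc 0 (-1) = false := by simp [pvHit]; omega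
    have e2 : pvHit gm fr fc tr tc 0 1 = false := by simp [pvHit]; omega
    have e3 : pvHit gm fr fc tr tc (-2) 0 = false := by simp [pvHit]; omega
    have e4 : pvHit gm fr fc tr tc 2 0 = false := by simp [pvHit]; omega
    simp [e1, e2, e3, e4]
    intro h _ _
    exact absurd h (by omega)

-- ===== VERDICT (by name: the statement is the Claim_ definition above) =====
theorem can_travel_to_spec : Claim_equal_can_travel_to := by
  intro gm fr fc tr tc _ _
  unfold Spec_can_travel_to
  exact can_travel_to_eq gm fr fc tr tc
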